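-- pv_equiv track=rewrite | github.com/Mglt-b/OpenColorFiber | fiber_colors.py | color_all_fibers
-- ===== SOURCE A (Python) =====
-- color_codes = {
--     "[FR] FT": ("red", "blue", "green", "yellow", "purple", "white", "orange", "grey", "brown", "black", "turquoise", "pink"),
--     "[FR] SFR": ("blue", "orange", "green", "brown", "grey", "yellow", "red", "purple", "white", "black", "pink", "turquoise"),
--     "FOTAG": ("blue", "orange", "green", "brown", "grey", "white", "red", "black", "yellow", "purple", "pink", "turquoise"),
--     "[CH] SWISSCOM CCM": ("red", "green", "yellow", "blue", "white", "purple", "orange", "black", "grey", "brown", "pink", "turquoise"),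
--     "DIN": ("red", "green", "blue", "yellow", "white", "grey", "brown", "purple", "turquoise", "black", "orange", "pink"),
--     "TIA/EIA-589 (MPO)": ("blue", "orange", "green", "brown", "grey", "white", "red", "black", "yellow", "purple", "pink", "turquoise"),
--     "IEC": ("blue", "yellow", "red", "white", "green", "purple", "orange", "grey", "turquoise", "black", "brown", "pink"),
--     "[BE] FOTAG IEEE 802.8": ("blue", "orange", "green", "brown", "grey", "white", "red", "black", "yellow", "purple", "pink", "turquoise"),
--     "IEC 60794-2": ("blue", "yellow", "red", "white", "green", "purple", "orange", "grey", "turquoise", "black", "brown", "pink"),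
--     "IEC 60304": ("red", "green", "blue", "yellow", "white", "grey", "brown", "purple", "turquoise", "black", "orange", "pink"),
--     "TIA/EIA-598 EN 50174-1": ("blue", "orange", "green", "brown", "grey", "white", "red", "black", "yellow", "purple", "pink", "turquoise"),
--     "ASF": ("red", "blue", "green", "yellow", "purple", "white", "orange", "grey", "brown", "black", "turquoise", "pink"),
--     "BOUYGUES TELECOM": ("red", "blue", "green", "yellow", "purple", "white", "orange", "grey", "brown", "black", "turquoise", "pink"),
--     "WORLDCOM": ("blue", "orange", "green", "brown", "grey", "yellow", "red", "purple", "white", "black", "pink", "turquoise"),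
--     "LD COM": ("blue", "orange", "green", "brown", "grey", "yellow", "red", "purple", "white", "black", "pink", "turquoise"),
--     "VIATEL": ("blue", "orange", "green", "brown", "grey", "yellow", "red", "black", "yellow", "purple", "pink", "turquoise"),
--     "[FR] SNCF": ("red", "blue", "green", "yellow", "purple", "white", "orange", "grey", "brown", "black", "turquoise", "pink")
-- }
--
-- allowed_modulos = [2, 4, 6, 12, 24, 36]
--
-- def color_all_fibers(capacity, modulo, color_code):
--     """
--     Returns a list of all fibers and tubes with their colors based on capacity, modulo, and color code.
--     Includes the fiber number in the cable.
--     """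
--     if color_code not in color_codes:
--         possible_codes = ', '.join(color_codes.keys())
--         return f"Unknown color code: '{color_code}'. Possible color codes are: {possible_codes}."
--
--     if modulo not in allowed_modulos:
--         possible_modulos = ', '.join(map(str, allowed_modulos))
--         return f"Invalid modulo: '{modulo}'. Possible modulos are: {possible_modulos}."
--
--     colors = color_codes[color_code]
--     num_colors = len(colors)
--     # Calculate the number of tubes needed
--     number_of_tubes = -(-capacity // modulo)  # Ceiling division
--
--     fibers_list = []
--
--     fiber_num_in_cable = 1
--
--     for tube_index in range(number_of_tubes):
--         tube_number = tube_index + 1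
--         color_repeat_count = tube_index // num_colors
--         tube_color_index = tube_index % num_colors
--         tube_color = colors[tube_color_index]
--         if color_repeat_count > 0:
--             tube_color_display = f"{tube_color} ({color_repeat_count + 1} rings)"
--         else:
--             tube_color_display = tube_color
--
--         fibers_in_this_tube = min(modulo, capacity - tube_index * modulo)
--
--         for fiber_index in range(fibers_in_this_tube):
--             fiber_number_in_tube = fiber_index + 1
--             fiber_color_index = fiber_index % num_colors
--             fiber_color = colors[fiber_color_index]
--
--             fibers_list.append({
--                 'fiber_number': fiber_num_in_cable,
--                 'tube_number': tube_number,
--                 'tube_color': tube_color_display,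
--                 'fiber_number_in_tube': fiber_number_in_tube,
--                 'fiber_color': fiber_color
--             })
--
--             fiber_num_in_cable += 1
--
--     # Format the output
--     output_lines = []
--     header = f"{'Fiber':<6} {'Tube':<6} {'Tube Color':<20} {'Fiber in Tube':<13} {'Fiber Color'}"
--     output_lines.append(header)
--     output_lines.append('-' * len(header))
--     for fiber in fibers_list:
--         line = f"{fiber['fiber_number']:<6} {fiber['tube_number']:<6} {fiber['tube_color']:<20} {fiber['fiber_number_in_tube']:<13} {fiber['fiber_color']}"
--         output_lines.append(line)
--
--     output = '\n'.join(output_lines)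
--     return output
-- ===== SOURCE B (Python) =====
-- color_codes = {
--     "[FR] FT": ("red", "blue", "green", "yellow", "purple", "white", "orange", "grey", "brown", "black", "turquoise", "pink"),
--     "[FR] SFR": ("blue", "orange", "green", "brown", "grey", "yellow", "red", "purple", "white", "black", "pink", "turquoise"),
--     "FOTAG": ("blue", "orange", "green", "brown", "grey", "white", "red", "black", "yellow", "purple", "pink", "turquoise"),
--     "[CH] SWISSCOM CCM": ("red", "green", "yellow", "blue", "white", "purple", "orange", "black", "grey", "brown", "pink", "turquoise"),
--     "DIN": ("red", "green", "blue", "yellow", "white", "grey", "brown", "purple", "turquoise", "black", "orange", "pink"),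
--     "TIA/EIA-589 (MPO)": ("blue", "orange", "green", "brown", "grey", "white", "red", "black", "yellow", "purple", "pink", "turquoise"),
--     "IEC": ("blue", "yellow", "red", "white", "green", "purple", "orange", "grey", "turquoise", "black", "brown", "pink"),
--     "[BE] FOTAG IEEE 802.8": ("blue", "orange", "green", "brown", "grey", "white", "red", "black", "yellow", "purple", "pink", "turquoise"),
--     "IEC 60794-2": ("blue", "yellow", "red", "white", "green", "purple", "orange", "grey", "turquoise", "black", "brown", "pink"),
--     "IEC 60304": ("red", "green", "blue", "yellow", "white", "grey", "brown", "purple", "turquoise", "black", "orange", "pink"),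
--     "TIA/EIA-598 EN 50174-1": ("blue", "orange", "green", "brown", "grey", "white", "red", "black", "yellow", "purple", "pink", "turquoise"),
--     "ASF": ("red", "blue", "green", "yellow", "purple", "white", "orange", "grey", "brown", "black", "turquoise", "pink"),
--     "BOUYGUES TELECOM": ("red", "blue", "green", "yellow", "purple", "white", "orange", "grey", "brown", "black", "turquoise", "pink"),
--     "WORLDCOM": ("blue", "orange", "green", "brown", "grey", "yellow", "red", "purple", "white", "black", "pink", "turquoise"),
--     "LD COM": ("blue", "orange", "green", "brown", "grey", "yellow", "red", "purple", "white", "black", "pink", "turquoise"),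
--     "VIATEL": ("blue", "orange", "green", "brown", "grey", "yellow", "red", "black", "yellow", "purple", "pink", "turquoise"),
--     "[FR] SNCF": ("red", "blue", "green", "yellow", "purple", "white", "orange", "grey", "brown", "black", "turquoise", "pink")
-- }
--
-- allowed_modulos = [2, 4, 6, 12, 24, 36]
--
--
-- def _fiber_line(colors, num_colors, modulo, g):
--     """One table row for global fiber index g (0-based); tube/fiber data via divmod."""
--     tube_index, fiber_index = divmod(g, modulo)
--     rings = tube_index // num_colors
--     tube_color = colors[tube_index % num_colors]
--     if rings > 0:
--         tube_color = tube_color + " (" + str(rings + 1) + " rings)"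
--     return (str(g + 1).ljust(6) + " " + str(tube_index + 1).ljust(6) + " "
--             + tube_color.ljust(20) + " " + str(fiber_index + 1).ljust(13) + " "
--             + colors[fiber_index % num_colors])
--
--
-- def color_all_fibers(capacity, modulo, color_code):
--     """Flat comprehension over the global fiber index; padding via str.ljust."""
--     if color_code not in color_codes:
--         possible_codes = ', '.join(color_codes.keys())
--         return f"Unknown color code: '{color_code}'. Possible color codes are: {possible_codes}."
--
--     if modulo not in allowed_modulos:
--         possible_modulos = ', '.join(map(str, allowed_modulos))
--         return f"Invalid modulo: '{modulo}'. Possible modulos are: {possible_modulos}."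
--
--     colors = color_codes[color_code]
--     num_colors = len(colors)
--
--     header = ("Fiber".ljust(6) + " " + "Tube".ljust(6) + " " + "Tube Color".ljust(20)
--               + " " + "Fiber in Tube".ljust(13) + " " + "Fiber Color")
--     body = [_fiber_line(colors, num_colors, modulo, g) for g in range(capacity)]
--     return '\n'.join([header, '-' * len(header)] + body)
-- ===== Notes on version B (the rewrite author's own statement) =====
-- stated objective: simpler
-- what changed: Replaced the nested tube/fiber loops, the running fiber counter and the intermediate list of dicts with a single flat comprehension over the global fiber index whose rows a per-row helper derives by divmod and formats with str.ljust.
import Mathlib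
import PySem

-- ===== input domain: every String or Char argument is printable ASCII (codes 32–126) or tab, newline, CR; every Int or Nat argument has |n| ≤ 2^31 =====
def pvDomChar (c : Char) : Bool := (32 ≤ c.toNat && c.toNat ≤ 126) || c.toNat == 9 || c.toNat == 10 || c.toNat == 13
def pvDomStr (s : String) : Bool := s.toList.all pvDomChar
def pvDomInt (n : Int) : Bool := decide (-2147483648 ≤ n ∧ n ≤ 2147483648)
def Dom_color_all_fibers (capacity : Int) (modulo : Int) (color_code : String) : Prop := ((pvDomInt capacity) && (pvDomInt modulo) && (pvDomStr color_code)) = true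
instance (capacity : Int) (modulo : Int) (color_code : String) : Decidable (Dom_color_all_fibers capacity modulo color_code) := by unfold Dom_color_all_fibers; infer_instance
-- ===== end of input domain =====

-- B replaces A's nested tube/fiber loops, running fiber counter and intermediate list of
-- dicts with one flat comprehension over the global fiber index whose rows are produced by
-- a per-row helper using divmod and str.ljust (objective: simpler; return value proved equal).

-- ===== PORT A =====
-- module-level constants shared by both Pythons (same module): the color-code dict
-- (Python tuple of colors ported as List String: it is a homogeneous, dynamically indexed
-- sequence) and the allowed modulos
def pvColorCodes : PySem.Dict String (List String) := PySem.Dict.ofList [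
  ("[FR] FT", ["red", "blue", "green", "yellow", "purple", "white", "orange", "grey", "brown", "black", "turquoise", "pink"]),
  ("[FR] SFR", ["blue", "orange", "green", "brown", "grey", "yellow", "red", "purple", "white", "black", "pink", "turquoise"]),
  ("FOTAG", ["blue", "orange", "green", "brown", "grey", "white", "red", "black", "yellow", "purple", "pink", "turquoise"]),
  ("[CH] SWISSCOM CCM", ["red", "green", "yellow", "blue", "white", "purple", "orange", "black", "grey", "brown", "pink", "turquoise"]),
  ("DIN", ["red", "green", "blue", "yellow", "white", "grey", "brown", "purple", "turquoise", "black", "orange", "pink"]),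
  ("TIA/EIA-589 (MPO)", ["blue", "orange", "green", "brown", "grey", "white", "red", "black", "yellow", "purple", "pink", "turquoise"]),
  ("IEC", ["blue", "yellow", "red", "white", "green", "purple", "orange", "grey", "turquoise", "black", "brown", "pink"]),
  ("[BE] FOTAG IEEE 802.8", ["blue", "orange", "green", "brown", "grey", "white", "red", "black", "yellow", "purple", "pink", "turquoise"]),
  ("IEC 60794-2", ["blue", "yellow", "red", "white", "green", "purple", "orange", "grey", "turquoise", "black", "brown", "pink"]),
  ("IEC 60304", ["red", "green", "blue", "yellow", "white", "grey", "brown", "purple", "turquoise", "black", "orange", "pink"]),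
  ("TIA/EIA-598 EN 50174-1", ["blue", "orange", "green", "brown", "grey", "white", "red", "black", "yellow", "purple", "pink", "turquoise"]),
  ("ASF", ["red", "blue", "green", "yellow", "purple", "white", "orange", "grey", "brown", "black", "turquoise", "pink"]),
  ("BOUYGUES TELECOM", ["red", "blue", "green", "yellow", "purple", "white", "orange", "grey", "brown", "black", "turquoise", "pink"]),
  ("WORLDCOM", ["blue", "orange", "green", "brown", "grey", "yellow", "red", "purple", "white", "black", "pink", "turquoise"]),
  ("LD COM", ["blue", "orange", "green", "brown", "grey", "yellow", "red", "purple", "white", "black", "pink", "turquoise"]),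
  ("VIATEL", ["blue", "orange", "green", "brown", "grey", "yellow", "red", "black", "yellow", "purple", "pink", "turquoise"]),
  ("[FR] SNCF", ["red", "blue", "green", "yellow", "purple", "white", "orange", "grey", "brown", "black", "turquoise", "pink"])]

def pvAllowedModulos : List Int := [2, 4, 6, 12, 24, 36]

-- f"{s:<w}": left-justify by character count (exact: Python pads with spaces to w chars)
def pvLjust (w : Nat) (s : String) : String :=
  s ++ String.ofList (List.replicate (w - s.toList.length) ' ')

-- the header f-string of A
def pvHeader : String :=
  pvLjust 6 "Fiber" ++ " " ++ pvLjust 6 "Tube" ++ " " ++ pvLjust 20 "Tube Color" ++ " " ++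
    pvLjust 13 "Fiber in Tube" ++ " " ++ "Fiber Color"

-- '-' * len(header)  (exact: len(header) ≥ 0)
def pvSep : String := String.ofList (List.replicate pvHeader.toList.length '-')

-- A's per-fiber line f-string
def pvFmtLine (fiber_number tube_number : Int) (tube_color : String) (fiber_in_tube : Int)
    (fiber_color : String) : String :=
  pvLjust 6 (PySem.Int.toStr fiber_number) ++ " " ++ pvLjust 6 (PySem.Int.toStr tube_number) ++ " " ++
    pvLjust 20 tube_color ++ " " ++ pvLjust 13 (PySem.Int.toStr fiber_in_tube) ++ " " ++ fiber_color

def color_all_fibers (capacity : Int) (modulo : Int) (color_code : String) : String :=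
  if ¬ pvColorCodes.contains color_code then
    "Unknown color code: '" ++ color_code ++ "'. Possible color codes are: " ++
      PySem.Str.join ", " pvColorCodes.keys ++ "."
  else if ¬ pvAllowedModulos.contains modulo then
    "Invalid modulo: '" ++ PySem.Int.toStr modulo ++ "'. Possible modulos are: " ++
      PySem.Str.join ", " (pvAllowedModulos.map PySem.Int.toStr) ++ "."
  else
    let colors := (pvColorCodes.get? color_code).getD []
    let num_colors : Int := colors.length
    let number_of_tubes := -(PySem.Int.floordiv (-capacity) modulo)  -- ceiling division
    -- loop state: (fibers_list, fiber_num_in_cable); dict entries as 5-tuples in field order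
    let st := (PySem.List.pyRange 0 number_of_tubes 1).foldl
      (fun (st : List (Int × Int × String × Int × String) × Int) tube_index =>
        let tube_number := tube_index + 1
        let color_repeat_count := PySem.Int.floordiv tube_index num_colors
        let tube_color := PySem.List.pyGetD colors (PySem.Int.mod tube_index num_colors) ""
        let tube_color_display :=
          if color_repeat_count > 0 then
            tube_color ++ " (" ++ PySem.Int.toStr (color_repeat_count + 1) ++ " rings)"
          else tube_color
        let fibers_in_this_tube := min modulo (capacity - tube_index * modulo)
        (PySem.List.pyRange 0 fibers_in_this_tube 1).foldl
          (fun (st2 : List (Int × Int × String × Int × String) × Int) fiber_index =>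
            let fiber_number_in_tube := fiber_index + 1
            let fiber_color := PySem.List.pyGetD colors (PySem.Int.mod fiber_index num_colors) ""
            (st2.1 ++ [(st2.2, tube_number, tube_color_display, fiber_number_in_tube, fiber_color)],
              st2.2 + 1)) st)
      ([], 1)
    let output_lines := [pvHeader, pvSep]
    let output_lines := st.1.foldl
      (fun acc f => acc ++ [pvFmtLine f.1 f.2.1 f.2.2.1 f.2.2.2.1 f.2.2.2.2]) output_lines
    PySem.Str.join "\n" output_lines

-- ===== PORT B =====
-- str.ljust(w): pad with spaces to w characters (B uses the method, not an f-string)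
def bLjust (s : String) (w : Nat) : String := s.pushn ' ' (w - s.toList.length)

-- header built by .ljust concatenation in Source B
def bHeader : String :=
  bLjust "Fiber" 6 ++ " " ++ bLjust "Tube" 6 ++ " " ++ bLjust "Tube Color" 20 ++ " " ++
    bLjust "Fiber in Tube" 13 ++ " " ++ "Fiber Color"

-- one table row for global fiber index g (0-based); tube/fiber data via divmod
def bFiberLine (colors : List String) (num_colors modulo g : Int) : String :=
  let tube_index := PySem.Int.floordiv g modulo
  let fiber_index := PySem.Int.mod g modulo
  let rings := PySem.Int.floordiv tube_index num_colors
  let tc0 := PySem.List.pyGetD colors (PySem.Int.mod tube_index num_colors) ""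
  let tube_color :=
    if rings > 0 then tc0 ++ " (" ++ PySem.Int.toStr (rings + 1) ++ " rings)" else tc0
  bLjust (PySem.Int.toStr (g + 1)) 6 ++ " " ++ bLjust (PySem.Int.toStr (tube_index + 1)) 6 ++ " " ++
    bLjust tube_color 20 ++ " " ++ bLjust (PySem.Int.toStr (fiber_index + 1)) 13 ++ " " ++
    PySem.List.pyGetD colors (PySem.Int.mod fiber_index num_colors) ""

def color_all_fibers_alt (capacity : Int) (modulo : Int) (color_code : String) : String :=
  if ¬ pvColorCodes.contains color_code then
    "Unknown color code: '" ++ color_code ++ "'. Possible color codes are: " ++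
      PySem.Str.join ", " pvColorCodes.keys ++ "."
  else if ¬ pvAllowedModulos.contains modulo then
    "Invalid modulo: '" ++ PySem.Int.toStr modulo ++ "'. Possible modulos are: " ++
      PySem.Str.join ", " (pvAllowedModulos.map PySem.Int.toStr) ++ "."
  else
    let colors := (pvColorCodes.get? color_code).getD []
    let num_colors : Int := colors.length
    let body := (PySem.List.pyRange 0 capacity 1).map (bFiberLine colors num_colors modulo)
    PySem.Str.join "\n" ([bHeader, String.ofList (bHeader.toList.map (fun _ => '-'))] ++ body)

-- ===== PRECONDITION & SPEC =====
def Spec_color_all_fibers (capacity : Int) (modulo : Int) (color_code : String) (out : String) : Prop := out = color_all_fibers_alt capacity modulo color_code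
instance (capacity : Int) (modulo : Int) (color_code : String) (out : String) : Decidable (Spec_color_all_fibers capacity modulo color_code out) := by unfold Spec_color_all_fibers; infer_instance

-- ===== CLAIM (what is proved, stated in full; the proofs are below) =====
def Claim_equal_color_all_fibers : Prop := ∀ (capacity : Int) (modulo : Int) (color_code : String), Dom_color_all_fibers capacity modulo color_code → Spec_color_all_fibers capacity modulo color_code (color_all_fibers capacity modulo color_code)

-- ===== LEMMAS AND PROOFS =====

-- str.ljust agrees with the f-string padding of A
theorem pv_pushn_toList (s : String) (c : Char) (n : Nat) :
    (s.pushn c n).toList = s.toList ++ List.replicate n c := by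
  induction n with
  | zero => simp [String.pushn, Nat.repeat]
  | succ n ih =>
    simp [String.pushn, Nat.repeat] at ih ⊢
    simp [ih, List.replicate_succ']

theorem pv_ljust_eq (w : Nat) (s : String) : bLjust s w = pvLjust w s := by
  apply String.toList_injective
  simp [bLjust, pvLjust, pv_pushn_toList]

theorem pv_header_eq : bHeader = pvHeader := by decide

theorem pv_sep_eq : String.ofList (bHeader.toList.map (fun _ => '-')) = pvSep := by decide

-- one tube's inner loop: appends one record per fiber and advances the counter
theorem pv_inner {α : Type} (G : Int → Nat → α) :
    ∀ (n : Nat) (acc : List α) (cnt : Int),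
      (List.range n).foldl (fun st2 i => (st2.1 ++ [G st2.2 i], st2.2 + 1)) (acc, cnt)
        = (acc ++ (List.range n).map (fun (i : Nat) => G (cnt + (i : Int)) i), cnt + n) := by
  intro n
  induction n with
  | zero => intro acc cnt; simp
  | succ n ih =>
    intro acc cnt
    simp only [List.range_succ, List.foldl_append, List.map_append, ih, List.foldl_cons,
      List.foldl_nil, List.map_cons, List.map_nil, List.append_assoc]
    refine Prod.ext rfl ?_
    push_cast; ring

-- the whole nested loop of A, over Nat indices: K = ceil(N / M) tubes, counter starting at 1,
-- equals the flat enumeration of all N fibers with tube = g / M, fiber-in-tube = g % M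
theorem pv_main {α : Type} (M : Nat) (hM : 0 < M) (F : Int → Nat → Nat → α) :
    ∀ (K N : Nat), K = (N + M - 1) / M →
      ((List.range K).foldl
          (fun (st : List α × Int) t =>
            (List.range (min M (N - t * M))).foldl
              (fun st2 i => (st2.1 ++ [F st2.2 t i], st2.2 + 1)) st)
          ([], 1))
        = ((List.range N).map (fun (g : Nat) => F ((g : Int) + 1) (g / M) (g % M)), (N : Int) + 1) := by
  intro K
  induction K with
  | zero =>
    intro N hK
    have h2 : N + M - 1 < 1 * M := (Nat.div_lt_iff_lt_mul hM).mp (by omega)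
    have hN : N = 0 := by omega
    subst hN
    simp
  | succ K ih =>
    intro N hK
    have h1 : (K + 1) * M ≤ N + M - 1 := (Nat.le_div_iff_mul_le hM).mp (by omega)
    have h2 : N + M - 1 < (K + 2) * M := (Nat.div_lt_iff_lt_mul hM).mp (by omega)
    rw [show (K + 1) * M = K * M + M by ring] at h1
    rw [show (K + 2) * M = K * M + 2 * M by ring] at h2
    have hlow : K * M < N := by generalize K * M = P at h1 h2 ⊢; omega
    have hhigh : N ≤ K * M + M := by generalize K * M = P at h1 h2 ⊢; omega
    have hKdiv : K = (K * M + M - 1) / M := by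
      have e : K * M + M - 1 = (M - 1) + M * K := by rw [Nat.mul_comm]; generalize M * K = P; omega
      rw [e, Nat.add_mul_div_left _ _ hM, Nat.div_eq_of_lt (by omega)]
      omega
    rw [List.range_succ, List.foldl_append, List.foldl_cons, List.foldl_nil]
    have hfull :
        List.foldl
          (fun (st : List α × Int) t =>
            (List.range (min M (N - t * M))).foldl
              (fun st2 i => (st2.1 ++ [F st2.2 t i], st2.2 + 1)) st)
          ([], 1) (List.range K)
        = List.foldl
          (fun (st : List α × Int) t =>
            (List.range (min M (K * M - t * M))).foldl
              (fun st2 i => (st2.1 ++ [F st2.2 t i], st2.2 + 1)) st)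
          ([], 1) (List.range K) := by
      apply PySem.List.foldl_congr_mem
      intro acc t ht
      have ht' : t < K := List.mem_range.mp ht
      have h3 : t * M + M ≤ K * M := by
        calc t * M + M = (t + 1) * M := by ring
        _ ≤ K * M := Nat.mul_le_mul_right M (Nat.succ_le_of_lt ht')
      have hA : min M (N - t * M) = M := by
        generalize t * M = Q at h3 ⊢; generalize K * M = P at h3 hlow ⊢; omega
      have hB : min M (K * M - t * M) = M := by
        generalize t * M = Q at h3 ⊢; generalize K * M = P at h3 ⊢; omega
      rw [hA, hB]
    rw [hfull, ih (K * M) hKdiv]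
    have hcnt : min M (N - K * M) = N - K * M := by
      generalize K * M = P at hlow hhigh ⊢; omega
    rw [hcnt, pv_inner (fun (c : Int) (i : Nat) => F c K i)]
    have hNsplit : N = K * M + (N - K * M) := by generalize K * M = P at hlow ⊢; omega
    have hmap : (List.range N).map (fun (g : Nat) => F ((g : Int) + 1) (g / M) (g % M))
        = (List.range (K * M)).map (fun (g : Nat) => F ((g : Int) + 1) (g / M) (g % M))
          ++ (List.range (N - K * M)).map (fun (i : Nat) => F (((K * M : Nat) : Int) + 1 + (i : Int)) K i) := by
      conv_lhs => rw [hNsplit]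
      rw [List.range_add, List.map_append, List.map_map]
      congr 1
      apply List.map_congr_left
      intro i hi
      have hi' : i < N - K * M := List.mem_range.mp hi
      have hiM : i < M := by generalize K * M = P at hhigh hi' ⊢; omega
      have hdiv : (K * M + i) / M = K := by
        rw [Nat.mul_comm K M, Nat.mul_add_div hM, Nat.div_eq_of_lt hiM]
        omega
      have hmod : (K * M + i) % M = i := by
        rw [Nat.mul_comm K M, Nat.mul_add_mod, Nat.mod_eq_of_lt hiM]
      simp only [Function.comp_apply, hdiv, hmod]
      have harg : ((K * M + i : Nat) : Int) + 1 = ((K * M : Nat) : Int) + 1 + (i : Int) := by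
        push_cast; ring
      rw [harg]
    rw [hmap]
    refine Prod.ext rfl ?_
    have : K * M ≤ N := hlow.le
    generalize K * M = P at this ⊢
    push_cast
    omega

-- Int → Nat bridge for the inner fiber count min(modulo, capacity - t*modulo)
theorem pv_count (M N a : Nat) :
    (min (M : Int) ((N : Int) - (a : Int))).toNat = min M (N - a) := by
  omega

-- ===== VERDICT (by name: the statement is the Claim_ definition above) =====
theorem color_all_fibers_spec : Claim_equal_color_all_fibers := by
  intro capacity modulo color_code _hdom
  unfold Spec_color_all_fibers
  by_cases hcc : pvColorCodes.contains color_code = true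
  case neg => simp [color_all_fibers, color_all_fibers_alt, hcc]
  case pos =>
  by_cases hm : pvAllowedModulos.contains modulo = true
  case neg =>
    have hm' : modulo ∉ pvAllowedModulos := by simpa using hm
    simp [color_all_fibers, color_all_fibers_alt, hcc, hm']
  case pos =>
  have hmpos : 0 < modulo := by
    have hmem : modulo ∈ pvAllowedModulos := by simpa using hm
    simp only [pvAllowedModulos, List.mem_cons, List.not_mem_nil, or_false] at hmem
    rcases hmem with h | h | h | h | h | h <;> omega
  simp only [color_all_fibers, color_all_fibers_alt, hcc, hm, not_true, if_false]
  rw [pv_sep_eq, pv_header_eq]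
  rcases (by omega : capacity ≤ 0 ∨ 0 < capacity) with hc | hc
  · -- empty table on both sides: no tubes, no fibers
    have hT : -(PySem.Int.floordiv (-capacity) modulo) ≤ 0 := by
      rw [PySem.Int.floordiv_eq_ediv_of_pos hmpos]
      have := Int.ediv_nonneg (a := -capacity) (b := modulo) (by omega) (by omega)
      omega
    rw [PySem.List.pyRange_one_eq_nil hT, PySem.List.pyRange_one_eq_nil hc]
    simp
  · obtain ⟨N, rfl⟩ : ∃ n : Nat, capacity = (n : Int) :=
      ⟨capacity.toNat, (Int.toNat_of_nonneg hc.le).symm⟩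
    obtain ⟨M, rfl⟩ : ∃ m : Nat, modulo = (m : Int) :=
      ⟨modulo.toNat, (Int.toNat_of_nonneg hmpos.le).symm⟩
    have hM : 0 < M := by exact_mod_cast hmpos
    have hN : 0 < N := by exact_mod_cast hc
    set colors := (pvColorCodes.get? color_code).getD [] with hcolors
    set K := (N + M - 1) / M with hK
    -- the tube count is the Nat ceiling division
    have hub : N ≤ K * M := by
      have h2 : N + M - 1 < (K + 1) * M := (Nat.div_lt_iff_lt_mul hM).mp (by omega)
      rw [show (K + 1) * M = K * M + M by ring] at h2
      generalize K * M = P at h2 ⊢; omega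
    have hlb : K * M < N + M := by
      have h1 : K * M ≤ N + M - 1 := (Nat.le_div_iff_mul_le hM).mp hK.le
      generalize K * M = P at h1 ⊢; omega
    have hT : -(PySem.Int.floordiv (-(N : Int)) (M : Int)) = (K : Int) := by
      rw [PySem.Int.neg_floordiv_neg_eq_iff_of_pos (by exact_mod_cast hM)]
      have hubZ : (N : Int) ≤ (K : Int) * (M : Int) := by exact_mod_cast hub
      have hlbZ : (K : Int) * (M : Int) < (N : Int) + (M : Int) := by exact_mod_cast hlb
      constructor
      · nlinarith
      · exact hubZ
    rw [hT]
    congr 1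
    rw [PySem.List.foldl_append_singleton_eq_map]
    simp only [PySem.List.pyRange_one, List.foldl_map, List.map_map, zero_add, sub_zero,
      ← Nat.cast_mul, pv_count, Int.toNat_natCast, PySem.Int.floordiv_natCast,
      PySem.Int.mod_natCast]
  -- reduce A's nested loop to the flat map and match it against B's comprehension
    rw [pv_main M hM
      (fun (c : Int) (t i : Nat) =>
        (c, (t : Int) + 1,
          (if ((t / colors.length : Nat) : Int) > 0 then
            PySem.List.pyGetD colors ((t % colors.length : Nat) : Int) "" ++ " (" ++
              PySem.Int.toStr (((t / colors.length : Nat) : Int) + 1) ++ " rings)"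
          else PySem.List.pyGetD colors ((t % colors.length : Nat) : Int) ""),
          (i : Int) + 1, PySem.List.pyGetD colors ((i % colors.length : Nat) : Int) ""))
      K N hK]
    simp only [List.map_map]
    refine congrArg (fun l => [pvHeader, pvSep] ++ l) ?_
    apply List.map_congr_left
    intro g _
    simp only [Function.comp_apply, bFiberLine, pvFmtLine, PySem.Int.floordiv_natCast,
      PySem.Int.mod_natCast, pv_ljust_eq]
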